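-- pv_equiv track=rewrite | github.com/alalapi-0/onepass-audio | onepass/seg_prosody.py | _iter_phrase_hits
-- ===== SOURCE A (Python) =====
-- from typing import Iterable, Sequence
--
-- def _iter_phrase_hits(text: str, cues: Iterable[str]) -> Iterable[int]:
--     for cue in cues:
--         if not cue:
--             continue
--         start = 0
--         while True:
--             hit = text.find(cue, start)
--             if hit < 0:
--                 break
--             yield hit + len(cue)
--             start = hit + len(cue)
-- ===== SOURCE B (Python) =====
-- from typing import Iterable
--
-- def _iter_phrase_hits(text: str, cues: Iterable[str]) -> Iterable[int]:
--     for cue in cues: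
--         if not cue:
--             continue
--         pos = 0
--         for seg in text.split(cue)[:-1]:
--             pos += len(seg) + len(cue)
--             yield pos
-- ===== Notes on version B (the rewrite author's own statement) =====
-- stated objective: alternative
-- what changed: B replaces A's repeated find/advance scan per cue by a single text.split(cue) followed by a running-offset accumulation over all segments but the last, yielding the same end positions in the same order.
import Mathlib
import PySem

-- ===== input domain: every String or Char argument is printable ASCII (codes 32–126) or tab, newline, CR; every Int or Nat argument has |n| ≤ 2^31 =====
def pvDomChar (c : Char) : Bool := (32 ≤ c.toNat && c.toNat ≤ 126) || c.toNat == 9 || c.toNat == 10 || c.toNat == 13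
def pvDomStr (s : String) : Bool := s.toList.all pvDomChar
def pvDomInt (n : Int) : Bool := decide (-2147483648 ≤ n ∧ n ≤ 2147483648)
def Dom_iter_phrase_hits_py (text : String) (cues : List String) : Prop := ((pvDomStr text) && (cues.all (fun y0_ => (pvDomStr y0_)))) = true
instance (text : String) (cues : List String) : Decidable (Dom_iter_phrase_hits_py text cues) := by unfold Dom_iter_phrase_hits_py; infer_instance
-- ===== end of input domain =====

-- B replaces A's repeated find/advance scan per cue by text.split(cue) followed by a
-- running-offset accumulation over the segments (same values, different decomposition).

-- ===== PORT A =====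
-- the 'while True: hit = text.find(cue, start) …' loop; fuel = len(text)+1 is a totality
-- guard only (start strictly increases each iteration, so it is never exhausted)
def pvALoop (t cue : List Char) : Nat → Int → List Int
  | 0, _ => []
  | fuel + 1, start =>
    let hit := PySem.Chars.findFrom t cue start none
    if hit < 0 then []
    else (hit + (cue.length : Int)) :: pvALoop t cue fuel (hit + (cue.length : Int))

def iter_phrase_hits_py (text : String) (cues : List String) : List Int :=
  cues.foldl (fun acc cue =>
    if PySem.Str.len cue = 0 then acc
    else acc ++ pvALoop text.toList cue.toList (text.toList.length + 1) 0) []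

-- ===== PORT B =====
-- 'for seg in segs: pos += len(seg) + len(cue); yield pos'
def pvBLoop (cue : List Char) (segs : List (List Char)) (pos : Int) : List Int :=
  match segs with
  | [] => []
  | seg :: rest =>
    (pos + (seg.length : Int) + (cue.length : Int)) ::
      pvBLoop cue rest (pos + (seg.length : Int) + (cue.length : Int))

-- one cue: text.split(cue)[:-1], then the running-offset loop from 0
def pvBOne (text cue : String) : List Int :=
  pvBLoop cue.toList
    (PySem.List.slice (PySem.Chars.splitOn text.toList cue.toList) none (some (-1))) 0

def iter_phrase_hits_py_alt (text : String) (cues : List String) : List Int :=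
  cues.foldl (fun acc cue =>
    if PySem.Str.len cue = 0 then acc
    else acc ++ pvBOne text cue) []

-- ===== PRECONDITION & SPEC =====
def Spec_iter_phrase_hits_py (text : String) (cues : List String) (out : List Int) : Prop := out = iter_phrase_hits_py_alt text cues
instance (text : String) (cues : List String) (out : List Int) : Decidable (Spec_iter_phrase_hits_py text cues out) := by unfold Spec_iter_phrase_hits_py; infer_instance

-- ===== CLAIM (what is proved, stated in full; the proofs are below) =====
def Claim_equal_iter_phrase_hits_py : Prop := ∀ (text : String) (cues : List String), Dom_iter_phrase_hits_py text cues → Spec_iter_phrase_hits_py text cues (iter_phrase_hits_py text cues)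

-- ===== LEMMAS AND PROOFS =====

-- canonical recursive form of str.split(sep) for sep ≠ [] (proof-side only)
def pvSplitR (cue : List Char) (hc : cue ≠ []) (u : List Char) : List (List Char) :=
  let f := PySem.Chars.find u cue
  if h : f < 0 then [u]
  else u.take f.toNat :: pvSplitR cue hc (u.drop (f.toNat + cue.length))
termination_by u.length
decreasing_by
  have h0 : 0 ≤ PySem.Chars.find u cue := le_of_not_gt h
  have hs := (PySem.Chars.find_spec h0).1
  have hlen : cue.length ≤ (u.drop (PySem.Chars.find u cue).toNat).length := hs.length_le
  have hcl : 1 ≤ cue.length := List.length_pos_iff.mpr hc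
  simp only [List.length_drop] at hlen ⊢
  omega

theorem pvSplitR_ne_nil (cue : List Char) (hc : cue ≠ []) (u : List Char) :
    pvSplitR cue hc u ≠ [] := by
  rw [pvSplitR.eq_def]
  by_cases h : PySem.Chars.find u cue < 0 <;> simp [h]

theorem pvSplitR_eq (cue : List Char) (hc : cue ≠ []) (u : List Char) :
    pvSplitR cue hc u =
      if PySem.Chars.find u cue < 0 then [u]
      else u.take (PySem.Chars.find u cue).toNat ::
        pvSplitR cue hc (u.drop ((PySem.Chars.find u cue).toNat + cue.length)) := by
  rw [pvSplitR.eq_def]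
  by_cases h : PySem.Chars.find u cue < 0 <;> simp [h]

theorem pv_find_eq_of (cue t : List Char) (m : Nat)
    (hp : cue <+: t.drop m) (hmin : ∀ i < m, ¬ cue <+: t.drop i) :
    PySem.Chars.find t cue = (m : Int) := by
  have hin : PySem.Chars.isIn cue t = true :=
    (PySem.Chars.exists_prefix_drop_iff_isIn cue t).mp ⟨m, hp⟩
  have hinf : cue <:+: t := (PySem.Chars.isIn_iff_infix cue t).mp hin
  have h0 : 0 ≤ PySem.Chars.find t cue := (PySem.Chars.find_nonneg_iff t cue).mpr hinf
  obtain ⟨hpre, hmn⟩ := PySem.Chars.find_spec h0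
  have : (PySem.Chars.find t cue).toNat = m := by
    rcases lt_trichotomy (PySem.Chars.find t cue).toNat m with h | h | h
    · exact absurd hpre (hmin _ h)
    · exact h
    · exact absurd hp (hmn _ h)
  omega

-- first-occurrence step: find on c :: rest when cue is not a prefix
theorem pv_find_step (cue : List Char) (c : Char) (rest : List Char)
    (hnp : ¬ cue <+: (c :: rest)) :
    PySem.Chars.find (c :: rest) cue =
      if PySem.Chars.find rest cue = -1 then -1 else PySem.Chars.find rest cue + 1 := by
  by_cases hr : PySem.Chars.find rest cue = -1
  · simp only [hr, if_pos]
    rw [PySem.Chars.find_eq_neg_one_iff] at hr ⊢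
    intro hinf
    apply hr
    obtain ⟨j, hj⟩ := (PySem.Chars.exists_prefix_drop_iff_isIn cue (c :: rest)).mpr
      ((PySem.Chars.isIn_iff_infix cue (c :: rest)).mpr hinf)
    apply (PySem.Chars.isIn_iff_infix cue rest).mp
    apply (PySem.Chars.exists_prefix_drop_iff_isIn cue rest).mp
    match j, hj with
    | 0, hj => exact absurd hj hnp
    | j + 1, hj => exact ⟨j, by simpa using hj⟩
  · simp only [hr, ite_false]
    have h0 : 0 ≤ PySem.Chars.find rest cue := by
      have := PySem.Chars.neg_one_le_find rest cue
      omega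
    obtain ⟨hpre, hmn⟩ := PySem.Chars.find_spec h0
    have heq := pv_find_eq_of cue (c :: rest) ((PySem.Chars.find rest cue).toNat + 1)
      (by simpa using hpre)
      (by
        intro i hi
        match i with
        | 0 => simpa using hnp
        | i + 1 =>
          simp only [List.drop_succ_cons]
          exact hmn i (by omega))
    rw [heq]; omega

def pvConsHead (p : List Char) : List (List Char) → List (List Char)
  | [] => [p]
  | x :: xs => (p ++ x) :: xs

theorem pv_go_eq (cue : List Char) (hc : cue ≠ []) :
    ∀ fuel (l cur : List Char) (acc : List (List Char)), l.length < fuel →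
      PySem.Chars.splitOn.go cue fuel l cur acc =
        acc.reverse ++ pvConsHead cur.reverse (pvSplitR cue hc l) := by
  intro fuel
  induction fuel with
  | zero => intro l cur acc h; omega
  | succ f ih =>
    intro l cur acc h
    match l with
    | [] =>
      have hfn : PySem.Chars.find [] cue = -1 :=
        (PySem.Chars.find_eq_neg_one_iff [] cue).mpr (by
          intro hinf
          exact hc (by simpa using List.eq_nil_of_infix_nil hinf))
      rw [pvSplitR.eq_def]
      simp [PySem.Chars.splitOn.go, hfn, pvConsHead]
    | c :: rest =>
      by_cases hp : cue.isPrefixOf (c :: rest)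
      · have hp' : cue <+: (c :: rest) := List.isPrefixOf_iff_prefix.mp hp
        have hfind : PySem.Chars.find (c :: rest) cue = 0 :=
          pv_find_eq_of cue (c :: rest) 0 (by simpa using hp') (by omega)
        have hstep : PySem.Chars.splitOn.go cue (f + 1) (c :: rest) cur acc =
            PySem.Chars.splitOn.go cue f (List.drop cue.length (c :: rest)) [] (cur.reverse :: acc) := by
          simp [PySem.Chars.splitOn.go, hp]
        rw [hstep, ih _ _ _ (by
          have hcl : 1 ≤ cue.length := List.length_pos_iff.mpr hc
          simp only [List.length_cons] at h
          simp only [List.length_drop, List.length_cons]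
          omega)]
        rw [pvSplitR_eq cue hc (c :: rest)]
        simp only [hfind]
        norm_num
        cases hX : pvSplitR cue hc (List.drop cue.length (c :: rest)) with
        | nil => exact absurd hX (pvSplitR_ne_nil _ _ _)
        | cons x xs => simp [pvConsHead]
      · have hp' : ¬ cue <+: (c :: rest) := fun hh => hp (List.isPrefixOf_iff_prefix.mpr hh)
        have hstep : PySem.Chars.splitOn.go cue (f + 1) (c :: rest) cur acc =
            PySem.Chars.splitOn.go cue f rest (c :: cur) acc := by
          simp [PySem.Chars.splitOn.go, hp]
        rw [hstep, ih _ _ _ (by simp at h ⊢; omega)]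
        congr 1
        have hfs := pv_find_step cue c rest hp'
        by_cases hr : PySem.Chars.find rest cue = -1
        · rw [pvSplitR_eq cue hc (c :: rest), pvSplitR_eq cue hc rest]
          simp [hfs, hr, pvConsHead]
        · have h0 : 0 ≤ PySem.Chars.find rest cue := by
            have := PySem.Chars.neg_one_le_find rest cue; omega
          have hfind1 : PySem.Chars.find (c :: rest) cue = PySem.Chars.find rest cue + 1 := by
            rw [hfs, if_neg hr]
          have hlt : ¬ PySem.Chars.find rest cue + 1 < 0 := by omega
          have hlt2 : ¬ PySem.Chars.find rest cue < 0 := by omega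
          rw [pvSplitR_eq cue hc (c :: rest), pvSplitR_eq cue hc rest]
          rw [hfind1, if_neg hlt, if_neg hlt2]
          have htn : (PySem.Chars.find rest cue + 1).toNat = (PySem.Chars.find rest cue).toNat + 1 := by omega
          have hidx : (PySem.Chars.find rest cue).toNat + 1 + cue.length
              = ((PySem.Chars.find rest cue).toNat + cue.length) + 1 := by omega
          simp [pvConsHead, htn, hidx, List.take_succ_cons, List.drop_succ_cons]
  
theorem pv_splitOn_eq (cue : List Char) (hc : cue ≠ []) (u : List Char) :
    PySem.Chars.splitOn u cue = pvSplitR cue hc u := by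
  have := pv_go_eq cue hc (u.length + 1) u [] [] (by omega)
  rw [PySem.Chars.splitOn, this]
  have hne := pvSplitR_ne_nil cue hc u
  match h : pvSplitR cue hc u, hne with
  | x :: xs, _ => simp [pvConsHead]

theorem pvBLoop_shift (cue : List Char) (segs : List (List Char)) (p : Int) :
    pvBLoop cue segs p = (pvBLoop cue segs 0).map (· + p) := by
  induction segs generalizing p with
  | nil => simp [pvBLoop]
  | cons s ss ih =>
    simp only [pvBLoop, List.map_cons]
    rw [ih, ih (0 + (s.length : Int) + (cue.length : Int)), List.map_map]
    refine congrArg₂ List.cons (by ring) ?_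
    congr 1
    funext x
    simp only [Function.comp]
    ring

theorem pvALoop_eq (t cue : List Char) (hc : cue ≠ []) :
    ∀ fuel (k : Nat), k ≤ t.length → t.length + 1 - k ≤ fuel →
      pvALoop t cue fuel (k : Int) =
        (pvBLoop cue ((pvSplitR cue hc (t.drop k)).dropLast) 0).map (· + (k : Int)) := by
  intro fuel
  induction fuel with
  | zero => intro k hk hf; omega
  | succ f ih =>
    intro k hk hf
    have hff := PySem.Chars.findFrom_natCast t cue k hk
    by_cases hr : PySem.Chars.find (t.drop k) cue = -1
    · rw [pvALoop]
      simp only [hff, hr, if_pos]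
      rw [pvSplitR_eq cue hc]
      simp [hr, pvBLoop]
    · have h0 : 0 ≤ PySem.Chars.find (t.drop k) cue := by
        have := PySem.Chars.neg_one_le_find (t.drop k) cue; omega
      have hs := (PySem.Chars.find_spec h0).1
      have hL : 1 ≤ cue.length := List.length_pos_iff.mpr hc
      have hle : (PySem.Chars.find (t.drop k) cue).toNat + cue.length ≤ t.length - k := by
        have := hs.length_le
        simp only [List.length_drop] at this
        omega
      rw [pvALoop]
      rw [hff, if_neg hr]
      rw [if_neg (show ¬ ((k : Int) + PySem.Chars.find (t.drop k) cue < 0) by omega)]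
      have hcast : (k : Int) + PySem.Chars.find (t.drop k) cue + (cue.length : Int)
          = ((k + ((PySem.Chars.find (t.drop k) cue).toNat + cue.length) : Nat) : Int) := by
        push_cast; omega
      have harg1 : k + ((PySem.Chars.find (t.drop k) cue).toNat + cue.length) ≤ t.length := by omega
      have harg2 : t.length + 1 - (k + ((PySem.Chars.find (t.drop k) cue).toNat + cue.length)) ≤ f := by omega
      rw [hcast, ih _ harg1 harg2]
      rw [pvSplitR_eq cue hc (t.drop k)]
      rw [if_neg (show ¬ PySem.Chars.find (t.drop k) cue < 0 by omega)]
      have hdd : List.drop ((PySem.Chars.find (t.drop k) cue).toNat + cue.length) (List.drop k t)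
          = List.drop (k + ((PySem.Chars.find (t.drop k) cue).toNat + cue.length)) t := by
        rw [List.drop_drop]
      rw [hdd]
      rw [List.dropLast_cons_of_ne_nil (pvSplitR_ne_nil cue hc _)]
      have htake : ((t.drop k).take (PySem.Chars.find (t.drop k) cue).toNat).length
          = (PySem.Chars.find (t.drop k) cue).toNat := by
        simp only [List.length_take, List.length_drop]
        omega
      simp only [pvBLoop, htake, List.map_cons]
      refine congrArg₂ List.cons (by push_cast; omega) ?_
      rw [pvBLoop_shift cue _ (0 + ((PySem.Chars.find (t.drop k) cue).toNat : Int) + (cue.length : Int)),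
        List.map_map]
      congr 1
      funext x
      simp only [Function.comp]
      push_cast; omega

theorem pv_per_cue (text cue : String) (hc : cue.toList ≠ []) :
    pvALoop text.toList cue.toList (text.toList.length + 1) 0 = pvBOne text cue := by
  have := pvALoop_eq text.toList cue.toList hc (text.toList.length + 1) 0 (by omega) (by omega)
  simp only [Nat.cast_zero] at this
  rw [this]
  rw [pvBOne]
  have hslice : PySem.List.slice (PySem.Chars.splitOn text.toList cue.toList) none (some (-1))
      = (PySem.Chars.splitOn text.toList cue.toList).dropLast := by
    simp [PySem.List.slice, PySem.List.clampIdx, List.dropLast_eq_take]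
    split_ifs with h
    · simp at h; simp [h]
    · omega
  rw [hslice, pv_splitOn_eq cue.toList hc text.toList]
  simp

-- ===== VERDICT (by name: the statement is the Claim_ definition above) =====
theorem iter_phrase_hits_py_spec : Claim_equal_iter_phrase_hits_py := by
  intro text cues _
  unfold Spec_iter_phrase_hits_py iter_phrase_hits_py iter_phrase_hits_py_alt
  congr 1
  funext acc cue
  by_cases hz : PySem.Str.len cue = 0
  · rw [if_pos hz, if_pos hz]
  · have hc : cue.toList ≠ [] := by
      intro h
      apply hz
      rw [PySem.Str.len_eq, h]
      simp
    rw [if_neg hz, if_neg hz, pv_per_cue text cue hc]
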